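-- pv_equiv track=rewrite | github.com/Aayan-Ali-Hashim/python_class | practice/problem_game/func.py | solution
-- ===== SOURCE A (Python) =====
-- def solution(string):
--     max_streak_X, max_streak_O = 0, 0
--     current_streak_X, current_streak_O = 0, 0
--
--     for char in string:
--         if char == 'X':
--             current_streak_X += 1
--             current_streak_O = 0
--         elif char == 'O':
--             current_streak_O += 1
--             current_streak_X = 0
--         else:
--             current_streak_X, current_streak_O = 0, 0
--
--         max_streak_X = max(max_streak_X, current_streak_X)
--         max_streak_O = max(max_streak_O, current_streak_O)
--
--     if max_streak_X >= 3 or max_streak_O >= 3: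
--         return "X" if max_streak_X >= 3 else "O"
--     else:
--         return "Tie"
-- ===== SOURCE B (Python) =====
-- def solution(string):
--     if "XXX" in string:
--         return "X"
--     if "OOO" in string:
--         return "O"
--     return "Tie"
-- ===== Notes on version B (the rewrite author's own statement) =====
-- stated objective: simpler
-- what changed: Replaces the four-counter streak-tracking loop with two substring membership tests: a streak of 3+ of a symbol exists iff that symbol tripled occurs as a substring, and checking X first keeps X's priority.
import Mathlib
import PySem

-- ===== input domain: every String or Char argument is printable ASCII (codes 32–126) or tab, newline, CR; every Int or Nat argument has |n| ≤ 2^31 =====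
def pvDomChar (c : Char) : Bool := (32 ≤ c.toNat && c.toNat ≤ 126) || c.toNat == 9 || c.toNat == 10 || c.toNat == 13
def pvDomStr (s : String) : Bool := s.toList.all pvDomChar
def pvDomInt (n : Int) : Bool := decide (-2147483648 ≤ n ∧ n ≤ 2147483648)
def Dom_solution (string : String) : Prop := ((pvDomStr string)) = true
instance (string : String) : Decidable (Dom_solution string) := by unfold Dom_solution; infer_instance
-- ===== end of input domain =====

-- B replaces A's four-counter streak loop with two substring tests ("XXX" in s / "OOO" in s): simpler and idiomatic.

-- ===== PORT A =====
-- A's loop body: state (max_streak_X, max_streak_O, current_streak_X, current_streak_O)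
def pvStep (st : Int × Int × Int × Int) (char : Char) : Int × Int × Int × Int :=
  let c : Int × Int :=
    if char = 'X' then (st.2.2.1 + 1, 0)
    else if char = 'O' then (0, st.2.2.2 + 1)
    else (0, 0)
  (max st.1 c.1, max st.2.1 c.2, c.1, c.2)

def solution (string : String) : String :=
  let s := string.toList.foldl pvStep (0, 0, 0, 0)
  if s.1 ≥ 3 ∨ s.2.1 ≥ 3 then (if s.1 ≥ 3 then "X" else "O") else "Tie"

-- ===== PORT B =====
def solution_alt (string : String) : String :=
  if PySem.Str.isIn "XXX" string then "X"
  else if PySem.Str.isIn "OOO" string then "O"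
  else "Tie"

-- ===== PRECONDITION & SPEC =====
def Spec_solution (string : String) (out : String) : Prop := out = solution_alt string
instance (string : String) (out : String) : Decidable (Spec_solution string out) := by unfold Spec_solution; infer_instance

-- ===== CLAIM (what is proved, stated in full; the proofs are below) =====
def Claim_equal_solution : Prop := ∀ (string : String), Dom_solution string → Spec_solution string (solution string)

-- ===== LEMMAS AND PROOFS =====

-- the best streak of character `a` reachable in `l` given a current streak `k`
def pvBest (a : Char) : List Char → Int → Int
  | [], _ => 0
  | c :: t, k => if c = a then max (k + 1) (pvBest a t (k + 1)) else pvBest a t 0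

lemma pvBest_nonneg (a : Char) (l : List Char) (k : Int) : 0 ≤ pvBest a l k := by
  induction l generalizing k with
  | nil => simp [pvBest]
  | cons c t ih =>
    simp only [pvBest]
    split <;> [exact le_max_of_le_right (ih _); exact ih _]

lemma pvBest_mono (a : Char) (l : List Char) {k k' : Int} (h : k ≤ k') :
    pvBest a l k ≤ pvBest a l k' := by
  induction l generalizing k k' with
  | nil => simp [pvBest]
  | cons c t ih =>
    simp only [pvBest]
    split
    · exact max_le_max (by omega) (ih (by omega))
    · exact le_refl _

lemma pvBest_cons_self (a : Char) (t : List Char) (k : Int) :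
    pvBest a (a :: t) k = max (k + 1) (pvBest a t (k + 1)) := by
  simp [pvBest]

lemma pvBest_cons_ne (a : Char) {c : Char} (h : ¬ c = a) (t : List Char) (k : Int) :
    pvBest a (c :: t) k = pvBest a t 0 := by
  simp [pvBest, h]

lemma pvStep_X (st : Int × Int × Int × Int) :
    pvStep st 'X' = (max st.1 (st.2.2.1 + 1), max st.2.1 0, st.2.2.1 + 1, 0) := by
  simp [pvStep]

lemma pvStep_O (st : Int × Int × Int × Int) :
    pvStep st 'O' = (max st.1 0, max st.2.1 (st.2.2.2 + 1), 0, st.2.2.2 + 1) := by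
  simp [pvStep]

lemma pvStep_other (st : Int × Int × Int × Int) {c : Char} (hx : ¬ c = 'X') (ho : ¬ c = 'O') :
    pvStep st c = (max st.1 0, max st.2.1 0, 0, 0) := by
  simp [pvStep, hx, ho]

-- A's fold computes (max mX (pvBest 'X' l cX), max mO (pvBest 'O' l cO), _, _)
lemma pvLoop_eq (l : List Char) (mX mO cX cO : Int) (hmX : 0 ≤ mX) (hmO : 0 ≤ mO) :
    (l.foldl pvStep (mX, mO, cX, cO)).1 = max mX (pvBest 'X' l cX) ∧
    (l.foldl pvStep (mX, mO, cX, cO)).2.1 = max mO (pvBest 'O' l cO) := by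
  induction l generalizing mX mO cX cO with
  | nil => simp only [List.foldl_nil, pvBest]; omega
  | cons c t ih =>
    by_cases hx : c = 'X'
    · subst hx
      rw [List.foldl_cons, pvStep_X]
      obtain ⟨h1, h2⟩ := ih (max mX (cX + 1)) (max mO 0) (cX + 1) 0 (by omega) (by omega)
      have hO := pvBest_nonneg 'O' t 0
      refine ⟨?_, ?_⟩
      · rw [h1, pvBest_cons_self]; omega
      · rw [h2, pvBest_cons_ne 'O' (by decide)]; omega
    · by_cases ho : c = 'O'
      · subst ho
        rw [List.foldl_cons, pvStep_O]
        obtain ⟨h1, h2⟩ := ih (max mX 0) (max mO (cO + 1)) 0 (cO + 1) (by omega) (by omega)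
        have hX := pvBest_nonneg 'X' t 0
        refine ⟨?_, ?_⟩
        · rw [h1, pvBest_cons_ne 'X' (by decide)]; omega
        · rw [h2, pvBest_cons_self]; omega
      · rw [List.foldl_cons, pvStep_other _ hx ho]
        obtain ⟨h1, h2⟩ := ih (max mX 0) (max mO 0) 0 0 (by omega) (by omega)
        have hX := pvBest_nonneg 'X' t 0
        have hO := pvBest_nonneg 'O' t 0
        refine ⟨?_, ?_⟩
        · rw [h1, pvBest_cons_ne 'X' hx]; omega
        · rw [h2, pvBest_cons_ne 'O' ho]; omega

lemma pvBest_of_infix (a : Char) (l : List Char) (k : Int) (hk : 0 ≤ k)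
    (h : [a, a, a] <:+: l) : 3 ≤ pvBest a l k := by
  induction l generalizing k with
  | nil => simp at h
  | cons c t ih =>
    rcases (List.infix_cons_iff.mp h) with hpre | hinf
    · obtain ⟨r, hr⟩ := hpre
      have hr' : a :: a :: a :: r = c :: t := by simpa using hr
      obtain ⟨rfl, rfl⟩ := List.cons.inj hr'
      rw [pvBest_cons_self, pvBest_cons_self, pvBest_cons_self]
      have := pvBest_nonneg a r (k + 3)
      omega
    · have ht : 3 ≤ pvBest a t 0 := ih 0 le_rfl hinf
      simp only [pvBest]
      split
      · have : pvBest a t 0 ≤ pvBest a t (k + 1) := pvBest_mono a t (by omega)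
        omega
      · exact ht

lemma pvBest_ge_three (a : Char) (l : List Char) (k : Nat) (h : 3 ≤ pvBest a l (k : Int)) :
    List.replicate (3 - k) a <+: l ∨ [a, a, a] <:+: l := by
  induction l generalizing k with
  | nil => simp [pvBest] at h
  | cons c t ih =>
    simp only [pvBest] at h
    by_cases hc : c = a
    · rw [if_pos hc] at h
      subst hc
      by_cases hk2 : 2 ≤ k
      · left
        by_cases hk3 : 3 ≤ k
        · have : 3 - k = 0 := by omega
          rw [this]; simp
        · have : 3 - k = 1 := by omega
          rw [this]; simp
      · have h' : 3 ≤ pvBest c t (((k + 1 : Nat) : Int)) := by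
          push_cast
          omega
        rcases ih (k + 1) h' with hpre | hinf
        · left
          have h3k : 3 - k = (3 - (k + 1)) + 1 := by omega
          rw [h3k, List.replicate_succ]
          exact List.cons_prefix_cons.mpr ⟨rfl, hpre⟩
        · right
          exact hinf.trans (List.infix_cons (List.infix_refl t))
    · rw [if_neg hc] at h
      have h0 : 3 ≤ pvBest a t ((0 : Nat) : Int) := by exact_mod_cast h
      rcases ih 0 h0 with hpre | hinf
      · right
        have hp : [a, a, a] <+: t := by simpa using hpre
        exact List.infix_cons hp.isInfix
      · exact Or.inr (List.infix_cons hinf)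

lemma pvBest_iff (a : Char) (l : List Char) : 3 ≤ pvBest a l 0 ↔ [a, a, a] <:+: l := by
  constructor
  · intro h
    rcases pvBest_ge_three a l 0 (by exact_mod_cast h) with hpre | hinf
    · have hp : [a, a, a] <+: l := by simpa using hpre
      exact hp.isInfix
    · exact hinf
  · exact pvBest_of_infix a l 0 le_rfl

-- ===== VERDICT (by name: the statement is the Claim_ definition above) =====
theorem solution_spec : Claim_equal_solution := by
  intro string _
  unfold Spec_solution solution solution_alt
  obtain ⟨h1, h2⟩ := pvLoop_eq string.toList 0 0 0 0 le_rfl le_rfl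
  simp only [h1, h2]
  have hxl : "XXX".toList = ['X', 'X', 'X'] := by decide
  have hol : "OOO".toList = ['O', 'O', 'O'] := by decide
  have hX : PySem.Str.isIn "XXX" string = true ↔ (3:Int) ≤ max 0 (pvBest 'X' string.toList 0) := by
    rw [PySem.Str.isIn_iff_infix, hxl, ← pvBest_iff,
      max_eq_right (pvBest_nonneg 'X' string.toList 0)]
  have hO : PySem.Str.isIn "OOO" string = true ↔ (3:Int) ≤ max 0 (pvBest 'O' string.toList 0) := by
    rw [PySem.Str.isIn_iff_infix, hol, ← pvBest_iff,
      max_eq_right (pvBest_nonneg 'O' string.toList 0)]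
  by_cases hx : PySem.Str.isIn "XXX" string = true
  · have h3 := hX.mp hx
    rw [if_pos (Or.inl h3), if_pos h3, if_pos hx]
  · have hnx : ¬ (3:Int) ≤ max 0 (pvBest 'X' string.toList 0) := fun h => hx (hX.mpr h)
    by_cases ho : PySem.Str.isIn "OOO" string = true
    · have h3 := hO.mp ho
      rw [if_pos (Or.inr h3), if_neg hnx, if_neg hx, if_pos ho]
    · have hno : ¬ (3:Int) ≤ max 0 (pvBest 'O' string.toList 0) := fun h => ho (hO.mpr h)
      rw [if_neg (by tauto), if_neg hx, if_neg ho]
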